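-- pv_equiv track=rewrite | github.com/wan-ji/QishiStudy | Algorithm/HW08_Bit_Manipulation/leetcode401_Binary_Watch.py | compute_numbers
-- ===== SOURCE A (Python) =====
-- def compute_numbers(i, tot_digit):
--     if i == 0: return [0]
--     min_num = (1 << i) - 1
--     max_num = min(min_num << (tot_digit - i), 11 if tot_digit == 4 else 59)
--     res = []
--     for num in range(min_num, max_num + 1):
--         if bin(num).count('1') == i:
--             res.append(num)
--     return res
-- ===== SOURCE B (Python) =====
-- def compute_numbers(i, tot_digit):
--     # Generate the i-set-bit numbers directly by choosing bit positions,
--     # instead of scanning a whole range and popcounting each number.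
--     if i == 0:
--         return [0]
--     cap = 11 if tot_digit == 4 else 59
--     positions = min(tot_digit, 6)  # any valid result fits in 6 bits (<= 59)
--     res = []
--     def choose(start, k, val):
--         if k == 0:
--             if val <= cap:
--                 res.append(val)
--             return
--         for p in range(start, positions):
--             choose(p + 1, k - 1, val | (1 << p))
--     choose(0, i, 0)
--     return sorted(res)
-- ===== Notes on version B (the rewrite author's own statement) =====
-- stated objective: alternative
-- what changed: B generates the valid numbers directly by recursively choosing i bit positions out of at most 6 (anything bigger exceeds the 11/59 cap) and sorting, instead of scanning the whole integer range and popcounting every number; B also never builds A's potentially huge shifted intermediate.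
import Mathlib
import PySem

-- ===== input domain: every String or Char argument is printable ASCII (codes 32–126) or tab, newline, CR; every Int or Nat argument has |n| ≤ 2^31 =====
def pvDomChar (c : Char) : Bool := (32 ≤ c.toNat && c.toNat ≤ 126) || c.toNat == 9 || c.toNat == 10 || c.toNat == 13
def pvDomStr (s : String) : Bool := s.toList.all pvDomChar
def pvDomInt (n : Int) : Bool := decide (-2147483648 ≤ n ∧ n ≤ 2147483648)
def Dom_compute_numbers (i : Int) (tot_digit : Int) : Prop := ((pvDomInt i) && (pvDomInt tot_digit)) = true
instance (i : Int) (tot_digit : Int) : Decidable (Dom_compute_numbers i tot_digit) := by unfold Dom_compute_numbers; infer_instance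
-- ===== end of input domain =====

-- B replaces A's range-scan-and-popcount with direct generation of the i-set-bit
-- numbers by choosing bit positions (objective: alternative algorithm; and B avoids
-- A's giant intermediate shift for large tot_digit).

-- ===== PORT A =====
-- bin(num).count('1') for num ≥ 0 (all loop values here are ≥ 1 under Pre_): number of set bits
-- fueled structural recursion (fuel n suffices since the argument halves each step)
def popcountAux : Nat → Nat → Nat
  | 0, _ => 0
  | fuel + 1, n => if n = 0 then 0 else n % 2 + popcountAux fuel (n / 2)

def popcount (n : Nat) : Nat := popcountAux n n

-- '1 << i' is ported as '(1 : Int) <<< i.toNat'; exact for i ≥ 0 (Pre_ excludes the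
-- negative shifts, on which Python raises ValueError).
def compute_numbers (i : Int) (tot_digit : Int) : List Int :=
  if i = 0 then [0] else
    let min_num : Int := ((1 : Int) <<< i.toNat) - 1
    let max_num : Int := min (min_num <<< (tot_digit - i).toNat) (if tot_digit = 4 then 11 else 59)
    (PySem.List.pyRange min_num (max_num + 1) 1).foldl
      (fun res num => if ((popcount num.toNat : Int) = i) then res ++ [num] else res) []

-- ===== PORT B =====
-- the recursive helper 'choose' of Source B; k stays an Int exactly as in Python.
-- Structural recursion on a fuel ≥ positions - start (the Python recursion's depth
-- bound); with that invariant — maintained by every call below — the fuel never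
-- runs out before the position range is empty, so the computation is exactly Python's.
def chooseRec (cap : Int) (positions : Nat) : Nat → Nat → Int → Int → List Int
  | fuel, start, k, val =>
    if k = 0 then (if val ≤ cap then [val] else []) else
      match fuel with
      | 0 => []
      | fuel' + 1 =>
        (List.range' start (positions - start)).flatMap
          (fun p => chooseRec cap positions fuel' (p + 1) (k - 1) (Int.lor val ((1 : Int) <<< p)))

def compute_numbers_alt (i : Int) (tot_digit : Int) : List Int :=
  if i = 0 then [0] else
    let cap : Int := if tot_digit = 4 then 11 else 59
    let positions : Nat := (min tot_digit 6).toNat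
    PySem.List.sorted (chooseRec cap positions positions 0 i 0) (fun x => x)

-- ===== PRECONDITION & SPEC =====
-- Pre_ excludes exactly the inputs on which A raises ValueError (a negative shift
-- count: i < 0, or 0 < i with tot_digit < i).
def Pre_compute_numbers (i : Int) (tot_digit : Int) : Prop := i = 0 ∨ (0 < i ∧ i ≤ tot_digit)
instance (i : Int) (tot_digit : Int) : Decidable (Pre_compute_numbers i tot_digit) := by unfold Pre_compute_numbers; infer_instance
def pvWitness_compute_numbers : Int × Int := (2, 4)

def Spec_compute_numbers (i : Int) (tot_digit : Int) (out : List Int) : Prop := out = compute_numbers_alt i tot_digit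
instance (i : Int) (tot_digit : Int) (out : List Int) : Decidable (Spec_compute_numbers i tot_digit out) := by unfold Spec_compute_numbers; infer_instance

-- ===== CLAIM (what is proved, stated in full; the proofs are below) =====
def Claim_equal_compute_numbers : Prop := ∀ (i : Int) (tot_digit : Int), Dom_compute_numbers i tot_digit → Pre_compute_numbers i tot_digit → Spec_compute_numbers i tot_digit (compute_numbers i tot_digit)

-- ===== LEMMAS AND PROOFS =====

-- chooseRec is empty when fewer than k positions remain
theorem chooseRec_nil (cap : Int) (positions : Nat) : ∀ (fuel start : Nat) (k : Int) (val : Int),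
    0 < k → (positions : Int) - start < k →
    chooseRec cap positions fuel start k val = [] := by
  intro fuel
  induction fuel with
  | zero =>
    intro start k val hpos hk
    have hk0 : ¬ k = 0 := by omega
    simp [chooseRec, hk0]
  | succ n ih =>
    intro start k val hpos hk
    have hk0 : ¬ k = 0 := by omega
    simp only [chooseRec, hk0, if_false]
    apply List.flatMap_eq_nil_iff.mpr
    intro p hp
    have hrange := List.mem_range'_1.mp hp
    exact ih (p + 1) (k - 1) _ (by omega) (by push_cast; omega)

-- the shifted bound ((1 << a) - 1) << b exceeds both caps once a + b ≥ 7 (a ≥ 1)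
theorem shifted_big (a b : Nat) (ha : 1 ≤ a) (hab : 7 ≤ a + b) :
    (64 : Int) ≤ (((1 : Int) <<< a) - 1) <<< b := by
  rw [Int.shiftLeft_eq, Int.shiftLeft_eq, one_mul]
  have hstep : (2 : Int) ^ a = 2 ^ (a - 1) * 2 := by
    rw [← pow_succ]; congr 1; omega
  have hone : (1 : Int) ≤ 2 ^ (a - 1) := one_le_pow₀ (by norm_num)
  have hlow : (2 : Int) ^ (a - 1) ≤ 2 ^ a - 1 := by rw [hstep]; linarith
  calc (64 : Int) = 2 ^ 6 := by norm_num
    _ ≤ 2 ^ (a - 1 + b) := pow_le_pow_right₀ (by norm_num) (by omega)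
    _ = 2 ^ (a - 1) * 2 ^ b := pow_add 2 (a - 1) b
    _ ≤ (2 ^ a - 1) * 2 ^ b :=
        mul_le_mul_of_nonneg_right hlow (by positivity)

-- A's value does not depend on tot_digit once tot_digit ≥ 7 (for 1 ≤ i ≤ 6)
theorem A_stable (i t : Int) (hi : 0 < i) (hi6 : i ≤ 6) (ht : 7 ≤ t) :
    compute_numbers i t = compute_numbers i 7 := by
  have hne : ¬ i = 0 := by omega
  have ht4 : ¬ t = 4 := by omega
  have h74 : ¬ (7 : Int) = 4 := by norm_num
  have h1 : (64 : Int) ≤ (((1 : Int) <<< i.toNat) - 1) <<< (t - i).toNat :=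
    shifted_big _ _ (by omega) (by omega)
  have h2 : (64 : Int) ≤ (((1 : Int) <<< i.toNat) - 1) <<< ((7 : Int) - i).toNat :=
    shifted_big _ _ (by omega) (by omega)
  unfold compute_numbers
  simp only [hne, ht4, h74, if_false]
  rw [min_eq_right (by omega), min_eq_right (by omega)]

-- B's value does not depend on tot_digit once tot_digit ≥ 7
theorem B_stable (i t : Int) (ht : 7 ≤ t) :
    compute_numbers_alt i t = compute_numbers_alt i 7 := by
  unfold compute_numbers_alt
  have ht4 : ¬ t = 4 := by omega
  have hmin : min t 6 = 6 := by omega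
  have hmin7 : min (7 : Int) 6 = 6 := by norm_num
  simp only [ht4, (by norm_num : ¬ (7 : Int) = 4), if_false, hmin, hmin7]

-- ===== VERDICT (by name: the statement is the Claim_ definition above) =====
theorem compute_numbers_spec : Claim_equal_compute_numbers := by
  intro i t _ hpre
  unfold Spec_compute_numbers
  rcases hpre with h0 | ⟨hi, hit⟩
  · subst h0
    simp [compute_numbers, compute_numbers_alt]
  · by_cases hbig : 7 ≤ i
    · -- both sides empty: A's range is empty, B cannot choose i > 6 positions
      have hne : ¬ i = 0 := by omega
      have hmin : (127 : Int) ≤ ((1 : Int) <<< i.toNat) - 1 := by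
        rw [Int.shiftLeft_eq, one_mul]
        have : (2 : Int) ^ 7 ≤ 2 ^ i.toNat := pow_le_pow_right₀ (by norm_num) (by omega)
        norm_num at this ⊢
        omega
      have hA : compute_numbers i t = [] := by
        unfold compute_numbers
        simp only [hne, if_false]
        rw [PySem.List.pyRange_one_eq_nil (by
          have hle : min ((((1 : Int) <<< i.toNat) - 1) <<< (t - i).toNat)
              (if t = 4 then 11 else 59) ≤ (if t = 4 then (11 : Int) else 59) := min_le_right _ _
          have h59 : (if t = 4 then (11 : Int) else 59) ≤ 59 := by split_ifs <;> norm_num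
          omega)]
        rfl
      have hB : compute_numbers_alt i t = [] := by
        unfold compute_numbers_alt
        simp only [hne, if_false]
        rw [chooseRec_nil _ _ _ _ _ _ (by omega) (by
          have : ((min t 6).toNat : Int) ≤ 6 := by omega
          omega)]
        rfl
      rw [hA, hB]
    · by_cases hsmall : t ≤ 6
      · have h2 : i ≤ 6 := by omega
        have h1 : 1 ≤ i := hi
        interval_cases i <;> interval_cases t <;> decide
      · have h7 : 7 ≤ t := by omega
        rw [A_stable i t hi (by omega) h7, B_stable i t h7]
        have h2 : i ≤ 6 := by omega
        have h1 : 1 ≤ i := hi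
        interval_cases i <;> decide
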